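-- pv_equiv track=rewrite | github.com/plore/project-euler-solutions | 090.py | can_display_all_squares
-- ===== SOURCE A (Python) =====
-- from typing import Iterable
--
-- def can_display_all_squares(dice1: Iterable[int], dice2: Iterable[int]) -> bool:
--     squares = [(0, 1), (0, 4), (0, 9), (1, 6), (2, 5), (3, 6), (4, 9), (6, 4), (8, 1)]
--     for digit1, digit2 in squares:
--         if not (
--             (digit1 in dice1 and digit2 in dice2)
--             or (digit1 in dice2 and digit2 in dice1)
--         ):
--             return False
--
--     return True
-- ===== SOURCE B (Python) =====
-- from typing import Iterable
--
-- def can_display_all_squares(dice1: Iterable[int], dice2: Iterable[int]) -> bool: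
--     squares = [(0, 1), (0, 4), (0, 9), (1, 6), (2, 5), (3, 6), (4, 9), (6, 4), (8, 1)]
--     needed = {d for sq in squares for d in sq}
--     present1 = needed.intersection(dice1)
--     present2 = needed.intersection(dice2)
--     achievable = {frozenset((a, b)) for a in present1 for b in present2}
--     return all(frozenset(sq) in achievable for sq in squares)
-- ===== Notes on version B (the rewrite author's own statement) =====
-- stated objective: alternative
-- what changed: B intersects each die with the nine needed digits and precomputes the set of all achievable unordered digit pairs once, then does a single membership pass over the squares, instead of scanning both dice (up to four membership tests) per square with an early-return loop.
import Mathlib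
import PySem

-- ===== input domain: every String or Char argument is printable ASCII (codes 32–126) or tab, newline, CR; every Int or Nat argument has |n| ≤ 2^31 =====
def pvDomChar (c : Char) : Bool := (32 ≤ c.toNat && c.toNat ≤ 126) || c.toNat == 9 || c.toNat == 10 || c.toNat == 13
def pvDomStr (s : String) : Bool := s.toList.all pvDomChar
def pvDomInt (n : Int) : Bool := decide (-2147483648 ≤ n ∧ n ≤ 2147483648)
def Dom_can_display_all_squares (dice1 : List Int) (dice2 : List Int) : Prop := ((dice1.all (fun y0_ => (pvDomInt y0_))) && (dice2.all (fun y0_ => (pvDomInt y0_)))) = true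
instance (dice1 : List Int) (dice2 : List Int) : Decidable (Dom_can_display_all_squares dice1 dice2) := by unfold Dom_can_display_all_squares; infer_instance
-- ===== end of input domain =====

-- ===== PORT A =====
-- A: loop over the nine squares with early return False
def pvSquares : List (Int × Int) :=
  [(0, 1), (0, 4), (0, 9), (1, 6), (2, 5), (3, 6), (4, 9), (6, 4), (8, 1)]

def pvLoopA (dice1 : List Int) (dice2 : List Int) : List (Int × Int) → Bool
  | [] => true
  | (d1, d2) :: rest =>
      if !((dice1.contains d1 && dice2.contains d2) ||
           (dice2.contains d1 && dice1.contains d2)) then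
        false
      else
        pvLoopA dice1 dice2 rest

def can_display_all_squares (dice1 : List Int) (dice2 : List Int) : Bool :=
  pvLoopA dice1 dice2 pvSquares

-- ===== PORT B =====
-- B: a frozenset {a, b} of two ints is represented exactly by its sorted pair
def pvFS (a b : Int) : Int × Int := (min a b, max a b)

-- needed = {d for sq in squares for d in sq}
def pvNeeded : PySem.Set Int := PySem.Set.ofList (pvSquares.flatMap (fun sq => [sq.1, sq.2]))

def can_display_all_squares_alt (dice1 : List Int) (dice2 : List Int) : Bool :=
  let present1 := PySem.Set.inter pvNeeded dice1
  let present2 := PySem.Set.inter pvNeeded dice2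
  let achievable : PySem.Set (Int × Int) :=
    PySem.Set.ofList (present1.flatMap (fun a => present2.map (fun b => pvFS a b)))
  pvSquares.all (fun sq => achievable.contains (pvFS sq.1 sq.2))

-- ===== PRECONDITION & SPEC =====
def Spec_can_display_all_squares (dice1 : List Int) (dice2 : List Int) (out : Bool) : Prop := out = can_display_all_squares_alt dice1 dice2
instance (dice1 : List Int) (dice2 : List Int) (out : Bool) : Decidable (Spec_can_display_all_squares dice1 dice2 out) := by unfold Spec_can_display_all_squares; infer_instance

-- ===== CLAIM (what is proved, stated in full; the proofs are below) =====
def Claim_equal_can_display_all_squares : Prop := ∀ (dice1 : List Int) (dice2 : List Int), Dom_can_display_all_squares dice1 dice2 → Spec_can_display_all_squares dice1 dice2 (can_display_all_squares dice1 dice2)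

-- ===== LEMMAS AND PROOFS =====

-- ===== VERDICT (by name: the statement is the Claim_ definition above) =====
lemma pvFS_eq_iff (a b d1 d2 : Int) (h : d1 ≠ d2) :
    pvFS a b = pvFS d1 d2 ↔ (a = d1 ∧ b = d2) ∨ (a = d2 ∧ b = d1) := by
  simp only [pvFS, Prod.mk.injEq, min_def, max_def]
  split_ifs <;> omega

lemma pvContains_fs (dice1 dice2 : List Int) (d1 d2 : Int) (h : d1 ≠ d2) :
    (PySem.Set.ofList (dice1.flatMap (fun a => dice2.map (fun b => pvFS a b)))).contains
        (pvFS d1 d2) =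
      ((dice1.contains d1 && dice2.contains d2) ||
       (dice2.contains d1 && dice1.contains d2)) := by
  rw [Bool.eq_iff_iff, PySem.Set.contains_iff, PySem.Set.mem_ofList]
  simp only [List.contains_iff_mem, List.mem_flatMap, List.mem_map, Bool.or_eq_true,
    Bool.and_eq_true]
  constructor
  · rintro ⟨a, ha, b, hb, hab⟩
    rcases (pvFS_eq_iff a b d1 d2 h).1 hab with ⟨rfl, rfl⟩ | ⟨rfl, rfl⟩
    · exact Or.inl ⟨ha, hb⟩
    · exact Or.inr ⟨hb, ha⟩
  · rintro (⟨h1, h2⟩ | ⟨h1, h2⟩)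
    · exact ⟨d1, h1, d2, h2, rfl⟩
    · exact ⟨d2, h2, d1, h1, (pvFS_eq_iff d2 d1 d1 d2 h).2 (Or.inr ⟨rfl, rfl⟩)⟩

lemma pvLoopA_eq_all (dice1 dice2 : List Int) (l : List (Int × Int)) :
    pvLoopA dice1 dice2 l =
      l.all (fun sq => (dice1.contains sq.1 && dice2.contains sq.2) ||
                       (dice2.contains sq.1 && dice1.contains sq.2)) := by
  induction l with
  | nil => rfl
  | cons p rest ih =>
      obtain ⟨d1, d2⟩ := p
      simp only [pvLoopA, List.all_cons, ih]
      cases h : ((dice1.contains d1 && dice2.contains d2) ||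
                 (dice2.contains d1 && dice1.contains d2)) <;> simp [h]

lemma pvAllCongrMem {α : Type} (l : List α) (f g : α → Bool)
    (h : ∀ a ∈ l, f a = g a) : l.all f = l.all g := by
  induction l with
  | nil => rfl
  | cons x xs ih =>
      simp only [List.all_cons, h x (List.mem_cons_self), ih fun a ha => h a (List.mem_cons_of_mem x ha)]

lemma pvInter_contains (xs : List Int) (d : Int) (hd : d ∈ pvNeeded) :
    List.contains (PySem.Set.inter pvNeeded xs) d = xs.contains d := by
  rw [Bool.eq_iff_iff]
  simp only [PySem.Set.contains_eq_listContains, List.contains_iff_mem,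
    PySem.Set.mem_inter, hd, true_and]

theorem can_display_all_squares_spec : Claim_equal_can_display_all_squares := by
  intro dice1 dice2 _
  unfold Spec_can_display_all_squares can_display_all_squares can_display_all_squares_alt
  rw [pvLoopA_eq_all]
  refine (pvAllCongrMem _ _ _ ?_).symm
  intro sq hsq
  have hne : sq.1 ≠ sq.2 ∧ sq.1 ∈ pvNeeded ∧ sq.2 ∈ pvNeeded := by
    simp only [pvSquares, List.mem_cons, List.not_mem_nil, or_false] at hsq
    rcases hsq with rfl|rfl|rfl|rfl|rfl|rfl|rfl|rfl|rfl <;> exact ⟨by decide, by decide, by decide⟩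
  rw [pvContains_fs _ _ sq.1 sq.2 hne.1,
    pvInter_contains dice1 sq.1 hne.2.1, pvInter_contains dice2 sq.2 hne.2.2,
    pvInter_contains dice2 sq.1 hne.2.1, pvInter_contains dice1 sq.2 hne.2.2]
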